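-- pv_equiv track=rewrite | github.com/Ranidnu-W/BitHelix | encoder/constraints.py | has_long_homopolymers
-- ===== SOURCE A (Python) =====
-- def has_long_homopolymers(dna_sequence: str, max_run: int = 3) -> bool:
--     """Check if the DNA sequence contains homopolymer runs longer than max_run."""
--     if max_run < 1:
--         return False
--     last_base = ''
--     run_length = 0
--     for base in dna_sequence:
--         if base == last_base:
--             run_length += 1
--             if run_length > max_run:
--                 return True
--         else:
--             last_base = base
--             run_length = 1
--     return False
-- ===== SOURCE B (Python) =====
-- def has_long_homopolymers(dna_sequence: str, max_run: int = 3) -> bool: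
--     """Check if the DNA sequence contains homopolymer runs longer than max_run."""
--     if max_run < 1:
--         return False
--     k = max_run + 1
--     return any(dna_sequence[i:i + k] == dna_sequence[i] * k
--                for i in range(len(dna_sequence) - max_run))
-- ===== Notes on version B (the rewrite author's own statement) =====
-- stated objective: alternative
-- what changed: Replaces A's stateful run-length counter loop (last_base/run_length with early return) by a stateless sliding-window test: a run longer than max_run exists iff some window of max_run+1 consecutive characters is a single repeated character.
import Mathlib
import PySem

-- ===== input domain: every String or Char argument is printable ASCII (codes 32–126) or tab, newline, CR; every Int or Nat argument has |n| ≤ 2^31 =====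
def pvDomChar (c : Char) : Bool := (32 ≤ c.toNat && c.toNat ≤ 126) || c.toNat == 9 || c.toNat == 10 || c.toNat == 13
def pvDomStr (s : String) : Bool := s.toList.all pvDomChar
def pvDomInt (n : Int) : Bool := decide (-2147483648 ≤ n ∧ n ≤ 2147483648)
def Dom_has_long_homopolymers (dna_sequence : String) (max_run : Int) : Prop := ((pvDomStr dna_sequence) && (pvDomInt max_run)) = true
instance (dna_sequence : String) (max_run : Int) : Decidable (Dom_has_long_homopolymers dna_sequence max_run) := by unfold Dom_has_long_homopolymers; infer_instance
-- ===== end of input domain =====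

-- B replaces A's stateful run-length counter by a stateless sliding-window test (alternative decomposition; same values everywhere).

-- ===== PORT A =====
-- the for-loop with early return; last_base = '' modeled as Option.none (no char equals '')
def pvLoopA (maxr : Int) : List Char → Option Char → Int → Bool
  | [], _, _ => false
  | b :: rest, last, run =>
    if some b = last then
      if run + 1 > maxr then true else pvLoopA maxr rest last (run + 1)
    else pvLoopA maxr rest (some b) 1

def has_long_homopolymers (dna_sequence : String) (max_run : Int) : Bool :=
  if max_run < 1 then false
  else pvLoopA max_run dna_sequence.toList none 0

-- ===== PORT B =====
def has_long_homopolymers_alt (dna_sequence : String) (max_run : Int) : Bool :=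
  if max_run < 1 then false
  else
    let l := dna_sequence.toList
    let k := max_run + 1
    -- any(dna_sequence[i:i+k] == dna_sequence[i] * k for i in range(len - max_run));
    -- the index i of dna_sequence[i] is always in range here, so pyGetD with a dummy default is exact
    (PySem.List.pyRange 0 ((l.length : Int) - max_run) 1).any (fun i =>
      decide (PySem.List.slice l (some i) (some (i + k)) =
              List.replicate k.toNat (PySem.List.pyGetD l i ' ')))

-- ===== PRECONDITION & SPEC =====
def Spec_has_long_homopolymers (dna_sequence : String) (max_run : Int) (out : Bool) : Prop := out = has_long_homopolymers_alt dna_sequence max_run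
instance (dna_sequence : String) (max_run : Int) (out : Bool) : Decidable (Spec_has_long_homopolymers dna_sequence max_run out) := by unfold Spec_has_long_homopolymers; infer_instance

-- ===== CLAIM (what is proved, stated in full; the proofs are below) =====
def Claim_equal_has_long_homopolymers : Prop := ∀ (dna_sequence : String) (max_run : Int), Dom_has_long_homopolymers dna_sequence max_run → Spec_has_long_homopolymers dna_sequence max_run (has_long_homopolymers dna_sequence max_run)

-- ===== LEMMAS AND PROOFS =====

theorem pv_infix_cons {l rest : List Char} {b : Char} (h : l <:+: rest) : l <:+: b :: rest := by
  rcases h with ⟨s, t, hh⟩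
  exact ⟨b :: s, t, by simp [hh]⟩

-- replicate j c is a prefix of replicate n c for j ≤ n, hence prefix-of-rest transfers down
theorem pv_replicate_prefix_mono {c : Char} {j n : Nat} (h : j ≤ n) {rest : List Char}
    (hp : List.replicate n c <+: rest) : List.replicate j c <+: rest := by
  refine List.IsPrefix.trans ?_ hp
  exact ⟨List.replicate (n - j) c, by rw [← List.replicate_add]; congr 1; omega⟩

theorem pv_replicate_prefix_cons {c b : Char} {n : Nat} {rest : List Char} :
    (List.replicate (n+1) c <+: b :: rest) ↔ (b = c ∧ List.replicate n c <+: rest) := by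
  simp [List.replicate_succ, List.cons_prefix_cons, eq_comm]

-- a fresh run of b just restarted (run = 1 on rest) is the same as a window in b :: rest
theorem pv_restart_iff (m : Int) (hm : 1 ≤ m) (b : Char) (rest : List Char) :
    (((∃ c', List.replicate (m.toNat + 1) c' <:+: rest) ∨ List.replicate (m.toNat + 1 - 1) b <+: rest) ↔
      ∃ c', List.replicate (m.toNat + 1) c' <:+: b :: rest) := by
  constructor
  · rintro (⟨c', h⟩ | h)
    · exact ⟨c', pv_infix_cons h⟩
    · refine ⟨b, List.IsPrefix.isInfix ?_⟩
      exact (pv_replicate_prefix_cons).mpr ⟨rfl, pv_replicate_prefix_mono (by omega) h⟩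
  · rintro ⟨c', h⟩
    rcases (List.infix_cons_iff).mp h with hpre | hinf
    · have hpre' : List.replicate (m.toNat + 1 - 1 + 1) c' <+: b :: rest := by
        have : m.toNat + 1 - 1 + 1 = m.toNat + 1 := by omega
        rw [this]; exact hpre
      rcases (pv_replicate_prefix_cons).mp hpre' with ⟨rfl, hrest⟩
      exact Or.inr hrest
    · exact Or.inl ⟨c', hinf⟩

-- the key loop invariant for A: running with remembered char c and current run length r
theorem pv_loopA_some (m : Int) (hm : 1 ≤ m) :
    ∀ (l : List Char) (c : Char) (r : Nat), 1 ≤ r → r ≤ m.toNat →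
      (pvLoopA m l (some c) (r : Int) = true ↔
        ((∃ c', List.replicate (m.toNat + 1) c' <:+: l) ∨
          List.replicate (m.toNat + 1 - r) c <+: l)) := by
  intro l
  induction l with
  | nil =>
    intro c r h1 h2
    simp only [pvLoopA, Bool.false_eq_true, false_iff]
    rintro (⟨c', h⟩ | h)
    · have := List.IsInfix.length_le h
      simp at this
    · have := List.IsPrefix.length_le h
      simp at this
      omega
  | cons b rest ih =>
    intro c r h1 h2
    by_cases hbc : b = c
    · subst hbc
      simp only [pvLoopA, if_true]
      by_cases hr : r = m.toNat
      · have hgt : ((r : Int) + 1 > m) := by omega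
        simp only [if_pos hgt, true_iff]
        right
        have : m.toNat + 1 - r = 1 := by omega
        rw [this]
        exact ⟨rest, by simp [List.replicate]⟩
      · have hlt : ¬ ((r : Int) + 1 > m) := by omega
        simp only [if_neg hlt]
        have hcast : (r : Int) + 1 = ((r + 1 : Nat) : Int) := by push_cast; ring
        rw [hcast, ih b (r+1) (by omega) (by omega)]
        constructor
        · rintro (⟨c', h⟩ | h)
          · exact Or.inl ⟨c', pv_infix_cons h⟩
          · right
            have : m.toNat + 1 - r = (m.toNat + 1 - (r+1)) + 1 := by omega
            rw [this, pv_replicate_prefix_cons]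
            exact ⟨rfl, h⟩
        · rintro (⟨c', h⟩ | h)
          · rcases (List.infix_cons_iff).mp h with hpre | hinf
            · have hpre' : List.replicate (m.toNat + 1 - 1 + 1) c' <+: b :: rest := by
                have : m.toNat + 1 - 1 + 1 = m.toNat + 1 := by omega
                rw [this]; exact hpre
              rcases (pv_replicate_prefix_cons).mp hpre' with ⟨rfl, hrest⟩
              exact Or.inr (pv_replicate_prefix_mono (by omega) hrest)
            · exact Or.inl ⟨c', hinf⟩
          · have heq : m.toNat + 1 - r = (m.toNat + 1 - (r+1)) + 1 := by omega
            rw [heq, pv_replicate_prefix_cons] at h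
            exact Or.inr h.2
    · have hne : ¬ (some b = some c) := by simp [hbc]
      simp only [pvLoopA, if_neg hne]
      have hcast : (1 : Int) = ((1 : Nat) : Int) := rfl
      rw [hcast, ih b 1 le_rfl (by omega), pv_restart_iff m hm b rest]
      constructor
      · intro h
        exact Or.inl h
      · rintro (h | h)
        · exact h
        · exfalso
          have heq : m.toNat + 1 - r = (m.toNat - r) + 1 := by omega
          rw [heq, pv_replicate_prefix_cons] at h
          exact hbc h.1
-- A's whole loop (initial state last_base = none, run = 0) finds exactly an (m+1)-window
theorem pv_loopA_spec (m : Int) (hm : 1 ≤ m) (l : List Char) :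
    (pvLoopA m l none 0 = true ↔ ∃ c, List.replicate (m.toNat + 1) c <:+: l) := by
  cases l with
  | nil =>
    simp only [pvLoopA, Bool.false_eq_true, false_iff]
    rintro ⟨c, h⟩
    have := List.IsInfix.length_le h
    simp at this
  | cons b rest =>
    have hne : ¬ (some b = (none : Option Char)) := by simp
    simp only [pvLoopA, if_neg hne]
    have hcast : (1 : Int) = ((1 : Nat) : Int) := rfl
    rw [hcast, pv_loopA_some m hm rest b 1 le_rfl (by omega), pv_restart_iff m hm b rest]

-- B's any-over-windows finds exactly an (m+1)-window
theorem pv_altBody_spec (m : Int) (hm : 1 ≤ m) (l : List Char) :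
    ((PySem.List.pyRange 0 ((l.length : Int) - m) 1).any (fun i =>
      decide (PySem.List.slice l (some i) (some (i + (m + 1))) =
              List.replicate (m + 1).toNat (PySem.List.pyGetD l i ' '))) = true ↔
      ∃ c, List.replicate (m.toNat + 1) c <:+: l) := by
  rw [List.any_eq_true]
  constructor
  · rintro ⟨i, hmem, hp⟩
    rw [PySem.List.mem_pyRange_one] at hmem
    simp only [decide_eq_true_eq] at hp
    obtain ⟨j, rfl⟩ : ∃ j : Nat, i = (j : Int) := ⟨i.toNat, by omega⟩
    refine ⟨PySem.List.pyGetD l (j : Int) ' ', ?_⟩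
    have hk : (m + 1).toNat = m.toNat + 1 := by omega
    rw [hk] at hp
    have hslice : PySem.List.slice l (some (j : Int)) (some ((j : Int) + (m + 1))) =
        (l.drop j).take (m.toNat + 1) := by
      have hc : (j : Int) + (m + 1) = ((j : Nat) : Int) + (((m.toNat + 1 : Nat)) : Int) := by
        push_cast; omega
      rw [hc, PySem.List.slice_natCast_add]
    rw [hslice] at hp
    rw [← hp]
    exact List.IsInfix.trans (List.IsPrefix.isInfix (List.take_prefix _ _))
      (List.IsSuffix.isInfix (List.drop_suffix _ _))
  · rintro ⟨c, s, t, hl⟩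
    refine ⟨(s.length : Int), ?_, ?_⟩
    · rw [PySem.List.mem_pyRange_one]
      have hlen : l.length = s.length + (m.toNat + 1) + t.length := by
        rw [← hl]; simp; omega
      constructor
      · omega
      · omega
    · simp only [decide_eq_true_eq]
      have hk : (m + 1).toNat = m.toNat + 1 := by omega
      have hslice : PySem.List.slice l (some (s.length : Int)) (some ((s.length : Int) + (m + 1))) =
          (l.drop s.length).take (m.toNat + 1) := by
        have hc : (s.length : Int) + (m + 1) = ((s.length : Nat) : Int) + (((m.toNat + 1 : Nat)) : Int) := by
          push_cast; omega
        rw [hc, PySem.List.slice_natCast_add]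
      have hdrop : l.drop s.length = List.replicate (m.toNat + 1) c ++ t := by
        rw [← hl, List.append_assoc, List.drop_left]
      have hget : PySem.List.pyGetD l (s.length : Int) ' ' = c := by
        rw [← hl, PySem.List.pyGetD_natCast, List.append_assoc, List.getD_eq_getElem?_getD,
          List.getElem?_append_right (le_refl s.length)]
        simp [List.replicate_succ]
      rw [hslice, hdrop, hget, hk]
      rw [List.take_left' (by simp)]

-- ===== VERDICT (by name: the statement is the Claim_ definition above) =====
theorem has_long_homopolymers_spec : Claim_equal_has_long_homopolymers := by
  intro s m _
  unfold Spec_has_long_homopolymers has_long_homopolymers has_long_homopolymers_alt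
  by_cases h : m < 1
  · simp [h]
  · simp only [if_neg h]
    have hm : 1 ≤ m := by omega
    rw [Bool.eq_iff_iff, pv_loopA_spec m hm s.toList, pv_altBody_spec m hm s.toList]
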